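-- pv_equiv track=rewrite | github.com/nicholasnlawson/Reminder-MaPPs-QR | flask_app/app.py | normalize_form
-- ===== SOURCE A (Python) =====
-- def normalize_form(form_term):
--     """
--     Normalize form terms to handle aliases
--     """
--     form_aliases = {
--         "tablet": ["tablet", "tablets", "tabs", "tab"],
--         "capsule": ["capsule", "capsules", "caps", "cap"],
--         "inhaler": ["inhaler", "inhalator", "inhale", "inh"],
--         "spray": ["spray", "sprays"],
--         "liquid": ["liquid", "solution", "suspension", "syrup", "soln"],
--         "gel": ["gel", "jelly"],
--         "cream": ["cream", "crm", "ointment"],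
--         "patch": ["patch", "patches", "plaster"]
--     }
--
--     form_term = form_term.lower()
--
--     # Check if the form term matches any of our known aliases
--     for normalized_form, aliases in form_aliases.items():
--         if form_term in aliases:
--             return normalized_form
--
--     # If no match found, return the original term
--     return form_term
-- ===== SOURCE B (Python) =====
-- # Binary search over a flat, lexicographically sorted (alias, canonical) table
-- # instead of scanning grouped alias lists.
-- _SORTED_ALIASES = [
--     ("cap", "capsule"), ("caps", "capsule"), ("capsule", "capsule"),
--     ("capsules", "capsule"), ("cream", "cream"), ("crm", "cream"),
--     ("gel", "gel"), ("inh", "inhaler"), ("inhalator", "inhaler"),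
--     ("inhale", "inhaler"), ("inhaler", "inhaler"), ("jelly", "gel"),
--     ("liquid", "liquid"), ("ointment", "cream"), ("patch", "patch"),
--     ("patches", "patch"), ("plaster", "patch"), ("soln", "liquid"),
--     ("solution", "liquid"), ("spray", "spray"), ("sprays", "spray"),
--     ("suspension", "liquid"), ("syrup", "liquid"), ("tab", "tablet"),
--     ("tablet", "tablet"), ("tablets", "tablet"), ("tabs", "tablet"),
-- ]
--
--
-- def normalize_form(form_term):
--     """Normalize form terms to handle aliases (binary search in a sorted table)."""
--     form_term = form_term.lower()
--     lo, hi = 0, len(_SORTED_ALIASES) - 1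
--     while lo <= hi:
--         mid = (lo + hi) // 2
--         key, canonical = _SORTED_ALIASES[mid]
--         if key == form_term:
--             return canonical
--         if key < form_term:
--             lo = mid + 1
--         else:
--             hi = mid - 1
--     return form_term
-- ===== Notes on version B (the rewrite author's own statement) =====
-- stated objective: alternative
-- what changed: Replaced A's per-call linear scan over grouped alias lists with a binary search in a flat, lexicographically sorted (alias, canonical) table, so the lookup is O(log n) string comparisons instead of scanning every alias group.
import Mathlib
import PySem

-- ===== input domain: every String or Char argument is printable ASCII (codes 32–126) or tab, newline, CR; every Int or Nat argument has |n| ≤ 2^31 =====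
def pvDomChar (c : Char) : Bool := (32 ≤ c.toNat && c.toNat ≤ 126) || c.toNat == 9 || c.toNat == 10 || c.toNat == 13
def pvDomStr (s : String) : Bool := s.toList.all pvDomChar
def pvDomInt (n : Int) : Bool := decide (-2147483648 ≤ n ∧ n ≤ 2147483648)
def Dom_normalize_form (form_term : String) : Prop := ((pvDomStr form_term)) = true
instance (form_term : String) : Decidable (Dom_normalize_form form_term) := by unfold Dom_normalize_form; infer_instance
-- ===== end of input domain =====

-- B replaces A's scan of grouped alias lists with a binary search in a flat, lexicographically sorted (alias, canonical) table (alternative algorithm; same mappings).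

-- ===== PORT A =====
-- the literal alias table of A, in source order
def nfTable : List (String × List String) :=
  [("tablet", ["tablet", "tablets", "tabs", "tab"]),
   ("capsule", ["capsule", "capsules", "caps", "cap"]),
   ("inhaler", ["inhaler", "inhalator", "inhale", "inh"]),
   ("spray", ["spray", "sprays"]),
   ("liquid", ["liquid", "solution", "suspension", "syrup", "soln"]),
   ("gel", ["gel", "jelly"]),
   ("cream", ["cream", "crm", "ointment"]),
   ("patch", ["patch", "patches", "plaster"])]

-- A's for-loop with early return: first group whose alias list contains the term
def nfLoop (t : String) : List (String × List String) → String
  | [] => t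
  | (nf, aliases) :: rest => if t ∈ aliases then nf else nfLoop t rest

def normalize_form (form_term : String) : String :=
  nfLoop (PySem.Str.lower form_term) nfTable

-- ===== PORT B =====
-- B's module-level sorted flat table, as the literal list Source B writes out
def nfPairs : List (String × String) :=
  [("cap", "capsule"), ("caps", "capsule"), ("capsule", "capsule"),
   ("capsules", "capsule"), ("cream", "cream"), ("crm", "cream"),
   ("gel", "gel"), ("inh", "inhaler"), ("inhalator", "inhaler"),
   ("inhale", "inhaler"), ("inhaler", "inhaler"), ("jelly", "gel"),
   ("liquid", "liquid"), ("ointment", "cream"), ("patch", "patch"),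
   ("patches", "patch"), ("plaster", "patch"), ("soln", "liquid"),
   ("solution", "liquid"), ("spray", "spray"), ("sprays", "spray"),
   ("suspension", "liquid"), ("syrup", "liquid"), ("tab", "tablet"),
   ("tablet", "tablet"), ("tablets", "tablet"), ("tabs", "tablet")]

-- Source B's while-loop, with a fuel guard for totality (the loop runs at most 28
-- times since lo/hi always narrow; fuel never runs out on any input).
-- The index mid always satisfies 0 ≤ lo ≤ mid ≤ hi < 27, so _SORTED_ALIASES[mid]
-- never raises and pyGetD is exact there.
def bsLoop (t : String) : Nat → Int → Int → String
  | 0, _, _ => t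
  | fuel + 1, lo, hi =>
    if lo ≤ hi then
      let mid := PySem.Int.floordiv (lo + hi) 2
      let p := PySem.List.pyGetD nfPairs mid ("", "")
      if p.1 = t then p.2
      -- Python's str '<' is Lean's '<' on toList (code-point lexicographic; see PYSEM str COMPARISON)
      else if p.1.toList < t.toList then bsLoop t fuel (mid + 1) hi
      else bsLoop t fuel lo (mid - 1)
    else t

def normalize_form_alt (form_term : String) : String :=
  let t := PySem.Str.lower form_term
  bsLoop t 28 0 ((nfPairs.length : Int) - 1)

-- ===== PRECONDITION & SPEC =====
def Spec_normalize_form (form_term : String) (out : String) : Prop := out = normalize_form_alt form_term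
instance (form_term : String) (out : String) : Decidable (Spec_normalize_form form_term out) := by unfold Spec_normalize_form; infer_instance

-- ===== CLAIM (what is proved, stated in full; the proofs are below) =====
def Claim_equal_normalize_form : Prop := ∀ (form_term : String), Dom_normalize_form form_term → Spec_normalize_form form_term (normalize_form form_term)

-- ===== LEMMAS AND PROOFS =====

-- the 27 alias keys, as the firsts of B's flat table
def nfKeys : List String := nfPairs.map Prod.fst

-- a term matching no alias falls through A's loop
theorem nfLoop_not_found (u : String) (h : u ∉ nfKeys) : nfLoop u nfTable = u := by
  simp only [nfKeys, nfPairs, List.map_cons, List.map_nil, List.mem_cons, not_or] at h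
  obtain ⟨h1,h2,h3,h4,h5,h6,h7,h8,h9,h10,h11,h12,h13,h14,h15,h16,h17,h18,h19,h20,h21,h22,h23,h24,h25,h26,h27,-⟩ := h
  simp [nfLoop, nfTable, h1,h2,h3,h4,h5,h6,h7,h8,h9,h10,h11,h12,h13,h14,h15,h16,h17,h18,h19,h20,h21,h22,h23,h24,h25,h26,h27]

-- a term matching no alias falls through B's binary search, whatever the window
theorem bsLoop_not_found (u : String) (h : u ∉ nfKeys) :
    ∀ (fuel : Nat) (lo hi : Int), 0 ≤ lo → hi ≤ 26 → bsLoop u fuel lo hi = u := by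
  intro fuel
  induction fuel with
  | zero => intro lo hi _ _; rfl
  | succ f ih =>
    intro lo hi hlo hhi
    by_cases hle : lo ≤ hi
    · obtain ⟨hml, hmr⟩ := PySem.Int.floordiv_two_mid_bounds hle
      simp only [bsLoop, if_pos hle]
      generalize hm : PySem.Int.floordiv (lo + hi) 2 = mid at hml hmr ⊢
      have h27 : mid.toNat < nfPairs.length := by
        simp only [nfPairs, List.length_cons, List.length_nil]; omega
      rw [PySem.List.pyGetD_of_nonneg _ _ (le_trans hlo hml), List.getD_eq_getElem _ _ h27]
      have hkey : (nfPairs[mid.toNat]).1 ∈ nfKeys :=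
        List.mem_map_of_mem (List.getElem_mem h27)
      have hne : (nfPairs[mid.toNat]).1 ≠ u := fun e => h (e ▸ hkey)
      rw [if_neg hne]
      by_cases hlt : (nfPairs[mid.toNat]).1.toList < u.toList
      · rw [if_pos hlt]; exact ih (mid + 1) hi (by omega) hhi
      · rw [if_neg hlt]; exact ih lo (mid - 1) hlo (by omega)
    · simp [bsLoop, hle]

-- the two loops agree on every term
theorem nf_agree (u : String) : nfLoop u nfTable = bsLoop u 28 0 26 := by
  by_cases h : u ∈ nfKeys
  · simp only [nfKeys, nfPairs, List.map_cons, List.map_nil, List.mem_cons] at h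
    rcases h with rfl|rfl|rfl|rfl|rfl|rfl|rfl|rfl|rfl|rfl|rfl|rfl|rfl|rfl|rfl|rfl|rfl|rfl|rfl|rfl|rfl|rfl|rfl|rfl|rfl|rfl|rfl|h
    · decide
    · decide
    · decide
    · decide
    · decide
    · decide
    · decide
    · decide
    · decide
    · decide
    · decide
    · decide
    · decide
    · decide
    · decide
    · decide
    · decide
    · decide
    · decide
    · decide
    · decide
    · decide
    · decide
    · decide
    · decide
    · decide
    · decide
    · exact absurd h (by simp)
  · rw [nfLoop_not_found u h, bsLoop_not_found u h 28 0 26 (by omega) (by omega)]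

-- ===== VERDICT (by name: the statement is the Claim_ definition above) =====
theorem normalize_form_spec : Claim_equal_normalize_form := by
  intro t _
  unfold Spec_normalize_form normalize_form normalize_form_alt
  simpa using nf_agree (PySem.Str.lower t)
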